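-- pv_equiv track=rewrite | github.com/Yan-Zhelanov/algorithms | sprint_4/2_review/a_search_system_with_repeats.py | search
-- ===== SOURCE A (Python) =====
-- def search(docs, requests):
--     docs_words = {}
--     repeats = {}
--     index = 0
--     while index < len(docs):
--         if docs[index] in docs[:index]:
--             previous = docs[:index].index(docs[index])
--             repeats[previous] = repeats.get(previous, []) + [index]
--             index += 1
--             continue
--         for word in docs[index].split():
--             docs_words[word] = docs_words.get(word, {})
--             docs_words[word][index] = docs_words[word].get(index, 0) + 1
--         index += 1
--     scores = []
--     for index in range(len(requests)):
--         scores.append({})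
--         for word in set(requests[index].split()):
--             if word not in docs_words:
--                 continue
--             for doc_index, count in docs_words[word].items():
--                 scores[index][doc_index] = (
--                     scores[index].get(doc_index, 0) + count
--                 )
--     result = {}
--     for index in range(len(scores)):
--         for item in sorted(
--             scores[index].items(), key=lambda item: (-item[1], item[0])
--         ):
--             if item[1] <= 0:
--                 continue
--             result[index] = result.get(index, []) + [item[0]+1]
--             if item[0] in repeats:
--                 result[index] += [index+1 for index in repeats[item[0]]]
--     return '\n'.join(
--         ' '.join(str(index) for index in element[:5])
--         for element in result.values() if len(element) > 0
--     )
-- ===== SOURCE B (Python) =====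
-- def search(docs, requests):
--     first_index = {}
--     repeats = {}
--     uniques = []
--     for idx, doc in enumerate(docs):
--         if doc in first_index:
--             repeats.setdefault(first_index[doc], []).append(idx)
--         else:
--             first_index[doc] = idx
--             uniques.append((idx, doc.split()))
--     lines = []
--     for request in requests:
--         wanted = set(request.split())
--         scored = [(i, s) for i, s in
--                   ((i, sum(w in wanted for w in words)) for i, words in uniques)
--                   if s > 0]
--         scored.sort(key=lambda p: (-p[1], p[0]))
--         out = []
--         for i, _ in scored:
--             out.append(i + 1)
--             out.extend(r + 1 for r in repeats.get(i, []))
--         if out: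
--             lines.append(' '.join(map(str, out[:5])))
--     return '\n'.join(lines)
-- ===== Notes on version B (the rewrite author's own statement) =====
-- stated objective: alternative
-- what changed: B drops A's inverted index (word -> {doc: count}) and A's quadratic docs[:index] membership/index scans: it dedups documents with a doc->first-index dict collecting repeats, keeps each unique document's word list, and scores every unique document per request directly against the request's word set, then sorts by (-score, index) and emits 1-based indices with repeats glued after their first occurrence, top 5 per non-empty line.
import Mathlib
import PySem

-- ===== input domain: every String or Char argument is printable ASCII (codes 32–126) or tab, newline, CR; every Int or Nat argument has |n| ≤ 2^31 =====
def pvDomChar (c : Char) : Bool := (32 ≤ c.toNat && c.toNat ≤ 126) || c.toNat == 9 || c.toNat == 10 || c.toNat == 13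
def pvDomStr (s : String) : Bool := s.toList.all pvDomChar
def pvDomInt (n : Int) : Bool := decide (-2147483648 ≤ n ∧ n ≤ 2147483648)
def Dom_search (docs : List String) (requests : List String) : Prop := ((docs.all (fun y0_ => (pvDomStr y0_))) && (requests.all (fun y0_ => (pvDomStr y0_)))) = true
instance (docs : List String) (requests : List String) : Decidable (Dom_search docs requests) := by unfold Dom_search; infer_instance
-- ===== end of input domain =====

-- B replaces A's inverted index (word → {doc : count}) and the quadratic `docs[:index]`
-- membership/index scans by a doc → first-index dict plus direct per-document scoring
-- against the request's word set (objective: alternative decomposition; return value only).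

-- ===== PORT A =====
-- the body of A's `for word in docs[index].split()` loop (two dict assignments)
def searchWordStep (i : Int) (dw : PySem.Dict String (PySem.Dict Int Int)) (w : String) :
    PySem.Dict String (PySem.Dict Int Int) :=
  let dw1 := dw.insert w (dw.getD w PySem.Dict.empty)   -- docs_words[word] = docs_words.get(word, {})
  dw1.insert w ((dw1.getD w PySem.Dict.empty).insert i
    ((dw1.getD w PySem.Dict.empty).getD i 0 + 1))       -- docs_words[word][index] = … + 1

-- one iteration of A's `while index < len(docs)` loop; state = (docs_words, repeats)
def searchIndexStep (docs : List String)
    (st : PySem.Dict String (PySem.Dict Int Int) × PySem.Dict Int (List Int)) (i : Int) :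
    PySem.Dict String (PySem.Dict Int Int) × PySem.Dict Int (List Int) :=
  let d := PySem.List.pyGetD docs i ""                  -- docs[index] (index always in range)
  let pre := PySem.List.slice docs none (some i)        -- docs[:index]
  if d ∈ pre then
    let previous : Int := ((PySem.List.index? pre d).getD 0 : Nat)  -- docs[:index].index(…), cannot miss here
    (st.1, st.2.insert previous (st.2.getD previous [] ++ [i]))
  else
    ((PySem.Str.split₀ d).foldl (searchWordStep i) st.1, st.2)

-- A's scoring of one request: `for word in set(requests[index].split()): …`
def searchScoreStep (dw : PySem.Dict String (PySem.Dict Int Int))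
    (s : PySem.Dict Int Int) (w : String) : PySem.Dict Int Int :=
  match dw.get? w with
  | none => s                                           -- `if word not in docs_words: continue`
  | some inner => inner.items.foldl (fun s p => s.insert p.1 (s.getD p.1 0 + p.2)) s

def searchScoreOf (dw : PySem.Dict String (PySem.Dict Int Int)) (r : String) : PySem.Dict Int Int :=
  (PySem.Set.ofList (PySem.Str.split₀ r)).foldl (searchScoreStep dw) PySem.Dict.empty

-- the body of A's `for item in sorted(scores[index].items(), …)` loop
def searchEmitStep (rp : PySem.Dict Int (List Int)) (i : Int)
    (res : PySem.Dict Int (List Int)) (it : Int × Int) : PySem.Dict Int (List Int) :=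
  if it.2 ≤ 0 then res
  else
    let res1 := res.insert i (res.getD i [] ++ [it.1 + 1])
    if rp.contains it.1 then
      res1.insert i (res1.getD i [] ++ (rp.getD it.1 []).map (fun j => j + 1))
    else res1

def search (docs : List String) (requests : List String) : String :=
  let st := (PySem.List.pyRange 0 (PySem.List.len docs) 1).foldl (searchIndexStep docs)
    (PySem.Dict.empty, PySem.Dict.empty)
  let scores : List (PySem.Dict Int Int) :=
    (PySem.List.pyRange 0 (PySem.List.len requests) 1).foldl
      (fun scores i => scores ++ [searchScoreOf st.1 (PySem.List.pyGetD requests i "")]) []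
  let result : PySem.Dict Int (List Int) :=
    (PySem.List.pyRange 0 (PySem.List.len scores) 1).foldl
      (fun res i =>
        (PySem.List.sorted2 (PySem.List.pyGetD scores i PySem.Dict.empty).items
            (fun it => -it.2) (fun it => it.1)).foldl (searchEmitStep st.2 i) res)
      PySem.Dict.empty
  PySem.Str.join "\n"
    ((result.values.filter (fun e => decide (0 < e.length))).map
      (fun e => PySem.Str.join " " ((PySem.List.slice e none (some 5)).map PySem.Int.toStr)))

-- ===== PORT B =====
-- one iteration of B's dedup loop; state = (first_index, repeats, uniques)
def searchDedupStep
    (st : PySem.Dict String Int × PySem.Dict Int (List Int) × List (Int × List String))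
    (p : Int × String) :
    PySem.Dict String Int × PySem.Dict Int (List Int) × List (Int × List String) :=
  match st.1.get? p.2 with
  | some first => (st.1, st.2.1.modify first [] (· ++ [p.1]), st.2.2)
  | none => (st.1.insert p.2 p.1, st.2.1, st.2.2 ++ [(p.1, PySem.Str.split₀ p.2)])

-- `sum(w in wanted for w in words)`
def searchAltScore (wanted : PySem.Set String) (words : List String) : Int :=
  (words.map (fun w => if PySem.Set.contains wanted w then (1 : Int) else 0)).sum

-- B's per-request output list `out`
def searchAltLine (repeats : PySem.Dict Int (List Int)) (uniques : List (Int × List String))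
    (request : String) : List Int :=
  let wanted := PySem.Set.ofList (PySem.Str.split₀ request)
  let scored := (uniques.map (fun u => (u.1, searchAltScore wanted u.2))).filter
    (fun q => decide (0 < q.2))
  let scored := PySem.List.sorted2 scored (fun q => -q.2) (fun q => q.1)
  scored.foldl (fun out q => out ++ [q.1 + 1] ++ (repeats.getD q.1 []).map (fun j => j + 1)) []

def search_alt (docs : List String) (requests : List String) : String :=
  let st := (PySem.List.enumerate docs).foldl searchDedupStep (PySem.Dict.empty, PySem.Dict.empty, [])
  let lines := requests.foldl
    (fun lines r =>
      let out := searchAltLine st.2.1 st.2.2 r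
      if out.isEmpty then lines
      else lines ++ [PySem.Str.join " " ((PySem.List.slice out none (some 5)).map PySem.Int.toStr)])
    []
  PySem.Str.join "\n" lines

-- ===== PRECONDITION & SPEC =====
def Spec_search (docs : List String) (requests : List String) (out : String) : Prop := out = search_alt docs requests
instance (docs : List String) (requests : List String) (out : String) : Decidable (Spec_search docs requests out) := by unfold Spec_search; infer_instance

-- ===== CLAIM (what is proved, stated in full; the proofs are below) =====
def Claim_equal_search : Prop := ∀ (docs : List String) (requests : List String), Dom_search docs requests → Spec_search docs requests (search docs requests)

-- ===== LEMMAS AND PROOFS =====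

-- ---- sorted2 with key (-snd, fst) on integer pairs: uniqueness up to permutation ----

-- the Boolean "strictly before" relation sorted2 uses for this key
def pvLt (a b : Int × Int) : Bool :=
  decide (b.2 < a.2) || (!decide (a.2 < b.2) && decide (a.1 < b.1))

theorem pvLt_asymm {a b : Int × Int} (h : pvLt a b = true) : pvLt b a = false := by
  simp [pvLt] at h ⊢; omega

theorem pvLt_false_trans {a b c : Int × Int} (h1 : pvLt b a = false) (h2 : pvLt c b = false) :
    pvLt c a = false := by
  simp [pvLt] at h1 h2 ⊢; omega

theorem pvLt_antisymm {a b : Int × Int} (h1 : pvLt a b = false) (h2 : pvLt b a = false) :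
    a = b := by
  simp [pvLt] at h1 h2
  have : a.1 = b.1 ∧ a.2 = b.2 := by omega
  exact Prod.ext this.1 this.2

theorem pvInsertBy_pairwise (x : Int × Int) (l : List (Int × Int))
    (h : l.Pairwise (fun a b => pvLt b a = false)) :
    (PySem.List.insertBy pvLt x l).Pairwise (fun a b => pvLt b a = false) := by
  induction l with
  | nil => simp [PySem.List.insertBy]
  | cons y ys ih =>
    rw [List.pairwise_cons] at h
    by_cases hb : pvLt x y = true
    · rw [show PySem.List.insertBy pvLt x (y :: ys) = x :: y :: ys by
        simp [PySem.List.insertBy, hb]]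
      refine List.Pairwise.cons ?_ (List.Pairwise.cons h.1 h.2)
      intro z hz
      rcases List.mem_cons.mp hz with rfl | hz
      · exact pvLt_asymm hb
      · exact pvLt_false_trans (pvLt_asymm hb) (h.1 z hz)
    · rw [show PySem.List.insertBy pvLt x (y :: ys) = y :: PySem.List.insertBy pvLt x ys by
        simp [PySem.List.insertBy, hb]]
      refine List.Pairwise.cons ?_ (ih h.2)
      intro z hz
      rw [PySem.List.mem_insertBy] at hz
      rcases hz with rfl | hz
      
      · simpa using hb
      · exact h.1 z hz

theorem pvFoldlInsertBy_pairwise (xs : List (Int × Int)) (acc : List (Int × Int))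
    (h : acc.Pairwise (fun a b => pvLt b a = false)) :
    (xs.foldl (fun acc x => PySem.List.insertBy pvLt x acc) acc).Pairwise
      (fun a b => pvLt b a = false) := by
  induction xs generalizing acc with
  | nil => exact h
  | cons x xs ih => exact ih _ (pvInsertBy_pairwise x acc h)

theorem pvSorted2_eq_foldl (xs : List (Int × Int)) :
    PySem.List.sorted2 xs (fun p => -p.2) (fun p => p.1) =
      xs.foldl (fun acc x => PySem.List.insertBy pvLt x acc) [] := by
  simp only [PySem.List.sorted2]
  rw [if_neg (by decide : ¬ (false = true))]
  congr 1
  funext acc x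
  congr 1
  funext a b
  have h1 : decide (-a.2 < -b.2) = decide (b.2 < a.2) := by rw [decide_eq_decide]; omega
  have h2 : decide (-b.2 < -a.2) = decide (a.2 < b.2) := by rw [decide_eq_decide]; omega
  simp only [pvLt]
  rw [h1, h2]

theorem pvSorted2_pairwise (xs : List (Int × Int)) :
    (PySem.List.sorted2 xs (fun p => -p.2) (fun p => p.1)).Pairwise
      (fun a b => pvLt b a = false) := by
  rw [pvSorted2_eq_foldl]
  exact pvFoldlInsertBy_pairwise xs [] (by simp)

theorem pvSorted2_congr (xs ys : List (Int × Int)) (h : xs.Perm ys) :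
    PySem.List.sorted2 xs (fun p => -p.2) (fun p => p.1) =
      PySem.List.sorted2 ys (fun p => -p.2) (fun p => p.1) := by
  refine List.Perm.eq_of_pairwise (le := fun a b => pvLt b a = false)
    (fun a b _ _ hab hba => pvLt_antisymm hba hab)
    (pvSorted2_pairwise xs) (pvSorted2_pairwise ys) ?_
  exact ((PySem.List.sorted2_perm xs _ _ false).trans h).trans
    (PySem.List.sorted2_perm ys _ _ false).symm

-- ---- generic association-list facts about PySem.Dict with the key at the last position ----

theorem pvGet?_mk_append_last {ν : Type} (base : List (Int × ν)) (i : Int) (cur : ν)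
    (h : ∀ p ∈ base, p.1 ≠ i) :
    (PySem.Dict.mk (base ++ [(i, cur)]) : PySem.Dict Int ν).get? i = some cur := by
  simp only [PySem.Dict.get?, List.find?_append]
  rw [List.find?_eq_none.mpr (by intro p hp; simpa using h p hp)]
  simp

theorem pvInsert_mk_append_last {ν : Type} (base : List (Int × ν)) (i : Int) (cur v : ν)
    (h : ∀ p ∈ base, p.1 ≠ i) :
    (PySem.Dict.mk (base ++ [(i, cur)]) : PySem.Dict Int ν).insert i v =
      PySem.Dict.mk (base ++ [(i, v)]) := by
  have hc : (PySem.Dict.mk (base ++ [(i, cur)]) : PySem.Dict Int ν).contains i = true := by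
    simp [PySem.Dict.contains]
  simp only [PySem.Dict.insert, hc, if_true]
  congr 1
  simp only [List.map_append]
  congr 1
  · exact (List.map_congr_left (fun p hp => by
      rw [if_neg (by simpa using h p hp)]; rfl)).trans (List.map_id base)
  · simp

-- ---- A's emit loop over one request, collapsed ----

def pvChunk (rp : PySem.Dict Int (List Int)) (it : Int × Int) : List Int :=
  (it.1 + 1) :: (rp.getD it.1 []).map (fun j => j + 1)

theorem pvEmitStep_collapse (rp : PySem.Dict Int (List Int)) (i : Int)
    (res : PySem.Dict Int (List Int)) (it : Int × Int) (hpos : 0 < it.2) :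
    searchEmitStep rp i res it = res.insert i (res.getD i [] ++ pvChunk rp it) := by
  unfold searchEmitStep
  rw [if_neg (by omega)]
  by_cases hc : rp.contains it.1 = true
  · simp only [hc, if_true, PySem.Dict.getD_insert_self, PySem.Dict.insert_insert_self, pvChunk]
    simp
  · simp only [Bool.not_eq_true] at hc
    simp only [hc, Bool.false_eq_true, if_false, pvChunk,
      PySem.Dict.getD_of_not_contains _ _ hc]
    simp

theorem pvEmit_fold_aux (rp : PySem.Dict Int (List Int)) (i : Int) (lst : List (Int × Int))
    (hpos : ∀ it ∈ lst, 0 < it.2) :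
    ∀ (base : List (Int × List Int)) (cur : List Int), (∀ p ∈ base, p.1 ≠ i) →
    (lst.foldl (searchEmitStep rp i) (PySem.Dict.mk (base ++ [(i, cur)]))).items =
      base ++ [(i, cur ++ lst.flatMap (pvChunk rp))] := by
  induction lst with
  | nil => intro base cur h; simp
  | cons it lst ih =>
    intro base cur h
    rw [List.foldl_cons, pvEmitStep_collapse rp i _ it (hpos it (by simp))]
    rw [show (PySem.Dict.mk (base ++ [(i, cur)]) : PySem.Dict Int (List Int)).getD i [] = cur by
      simp [PySem.Dict.getD_eq_get?_getD, pvGet?_mk_append_last base i cur h]]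
    rw [pvInsert_mk_append_last base i cur _ h]
    rw [ih (fun it hit => hpos it (by simp [hit])) base _ h]
    simp

theorem pvEmit_fold_items (rp : PySem.Dict Int (List Int)) (i : Int) (lst : List (Int × Int))
    (hpos : ∀ it ∈ lst, 0 < it.2) (res : PySem.Dict Int (List Int))
    (hfresh : res.contains i = false) :
    (lst.foldl (searchEmitStep rp i) res).items =
      res.items ++ (if lst.isEmpty then [] else [(i, lst.flatMap (pvChunk rp))]) := by
  have hbase : ∀ p ∈ res.items, p.1 ≠ i := by
    intro p hp
    simp only [PySem.Dict.contains, List.any_eq_false] at hfresh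
    simpa using hfresh p hp
  cases lst with
  | nil => simp
  | cons it lst =>
    rw [List.foldl_cons, pvEmitStep_collapse rp i _ it (hpos it (by simp))]
    rw [PySem.Dict.getD_of_not_contains _ _ hfresh]
    have hins : res.insert i ([] ++ pvChunk rp it) =
        PySem.Dict.mk (res.items ++ [(i, [] ++ pvChunk rp it)]) := by
      simp only [PySem.Dict.insert, hfresh, Bool.false_eq_true, if_false]
    rw [hins, pvEmit_fold_aux rp i lst (fun x hx => hpos x (by simp [hx])) res.items _ hbase]
    simp

-- ---- characterisation of A's inverted index relative to the unique-document list ----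

def pvDWOK (U : List (Int × List String)) (dw : PySem.Dict String (PySem.Dict Int Int)) : Prop :=
  ∀ w : String,
    (∀ inner, dw.get? w = some inner →
        inner.keys.Nodup ∧
        (∀ i : Int, i ∈ inner.keys ↔ ∃ u ∈ U, u.1 = i ∧ 0 < u.2.count w) ∧
        (∀ u ∈ U, inner.getD u.1 0 = (u.2.count w : Int))) ∧
    (dw.get? w = none → ∀ u ∈ U, u.2.count w = 0)

def pvCnt (U : List (Int × List String)) (w : String) (i : Int) : Int :=
  ((U.filter (fun u => u.1 == i)).map (fun u => (u.2.count w : Int))).sum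

def pvLfor (U : List (Int × List String)) (r : String) : List (Int × Int) :=
  (U.map (fun u => (u.1, searchAltScore (PySem.Set.ofList (PySem.Str.split₀ r)) u.2))).filter
    (fun q => decide (0 < q.2))

theorem pvFilter_key_singleton {U : List (Int × List String)} (hnd : (U.map Prod.fst).Nodup)
    {u : Int × List String} (hu : u ∈ U) : U.filter (fun v => v.1 == u.1) = [u] := by
  induction U with
  | nil => cases hu
  | cons v V ih =>
    simp only [List.map_cons, List.nodup_cons] at hnd
    rcases List.mem_cons.mp hu with rfl | hu
    · rw [List.filter_cons_of_pos (by simp)]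
      rw [List.filter_eq_nil_iff.mpr ?_]
      · intro q hq
        simp only [beq_iff_eq]
        intro hqe
        exact hnd.1 (hqe ▸ List.mem_map_of_mem hq)
    · rw [List.filter_cons_of_neg ?_, ih hnd.2 hu]
      simp only [beq_iff_eq]
      intro hve
      exact hnd.1 (hve ▸ List.mem_map_of_mem hu)

theorem pvCnt_eq {U : List (Int × List String)} (hnd : (U.map Prod.fst).Nodup)
    {u : Int × List String} (hu : u ∈ U) (w : String) :
    pvCnt U w u.1 = (u.2.count w : Int) := by
  rw [pvCnt, pvFilter_key_singleton hnd hu]; simp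

theorem pvCnt_eq_zero {U : List (Int × List String)} {i : Int}
    (h : ∀ u ∈ U, ¬(u.1 = i ∧ 0 < u.2.count w)) : pvCnt U w i = 0 := by
  apply List.sum_eq_zero
  intro x hx
  rcases List.mem_map.mp hx with ⟨u, hu, rfl⟩
  rcases List.mem_filter.mp hu with ⟨huU, hkey⟩
  have hn := h u huU
  simp only [beq_iff_eq] at hkey
  have hz : u.2.count w = 0 := by
    by_contra hnz
    exact hn ⟨hkey, Nat.pos_of_ne_zero hnz⟩
  simp [hz]

theorem pvCnt_nonneg (U : List (Int × List String)) (w : String) (i : Int) : 0 ≤ pvCnt U w i := by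
  apply List.sum_nonneg
  intro x hx
  rcases List.mem_map.mp hx with ⟨u, _, rfl⟩
  positivity

theorem pvFoldlInsertAdd_getD (l : List (Int × Int)) :
    ∀ (s : PySem.Dict Int Int) (i : Int),
    (l.foldl (fun s p => s.insert p.1 (s.getD p.1 0 + p.2)) s).getD i 0 =
      s.getD i 0 + ((l.filter (fun p => p.1 == i)).map (·.2)).sum := by
  induction l with
  | nil => intro s i; simp
  | cons p t ih =>
    intro s i
    rw [List.foldl_cons, ih]
    rw [PySem.Dict.getD_insert]
    by_cases h : i = p.1
    · subst h
      rw [List.filter_cons_of_pos (by simp), if_pos rfl]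
      simp only [List.map_cons, List.sum_cons]
      ring
    · rw [List.filter_cons_of_neg (by simpa using fun he => h he.symm), if_neg h]

theorem pvDict_filter_sum (l : List (Int × Int)) (hnd : (l.map Prod.fst).Nodup) (i : Int) :
    ((l.filter (fun p => p.1 == i)).map (·.2)).sum =
      (PySem.Dict.mk l : PySem.Dict Int Int).getD i 0 := by
  induction l with
  | nil => simp [PySem.Dict.getD, PySem.Dict.get?]
  | cons p t ih =>
    simp only [List.map_cons, List.nodup_cons] at hnd
    obtain ⟨k, v⟩ := p
    by_cases h : k = i
    · subst h
      rw [List.filter_cons_of_pos (by simp)]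
      rw [List.filter_eq_nil_iff.mpr ?_]
      · simp [PySem.Dict.getD_eq_get?_getD, PySem.Dict.get?_mk_cons]
      · intro q hq
        simp only [beq_iff_eq]
        intro hqe
        apply hnd.1
        rw [← hqe]
        exact List.mem_map.mpr ⟨q, hq, rfl⟩
    · rw [List.filter_cons_of_neg (by simpa using h), ih hnd.2]
      simp [PySem.Dict.getD_eq_get?_getD, PySem.Dict.get?_mk_cons,
        (by simpa using h : ¬ ((k == i) = true))]

theorem pvNotMemKeys_contains {ν : Type} (d : PySem.Dict Int ν) (i : Int) (h : i ∉ d.keys) :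
    d.contains i = false := by
  rw [PySem.Dict.contains_eq_decide_mem_keys]
  simpa using h

theorem pvScoreStep_getD (U : List (Int × List String))
    (dw : PySem.Dict String (PySem.Dict Int Int))
    (hnd : (U.map Prod.fst).Nodup) (hdw : pvDWOK U dw)
    (s : PySem.Dict Int Int) (w : String) (i : Int) :
    (searchScoreStep dw s w).getD i 0 = s.getD i 0 + pvCnt U w i := by
  unfold searchScoreStep
  cases hget : dw.get? w with
  | none =>
    have hz := (hdw w).2 hget
    rw [pvCnt_eq_zero (fun u hu => by simp [hz u hu])]
    simp
  | some inner =>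
    obtain ⟨hknd, hiff, hval⟩ := (hdw w).1 inner hget
    rw [pvFoldlInsertAdd_getD]
    congr 1
    rw [pvDict_filter_sum inner.items (by exact hknd) i]
    by_cases hex : ∃ u ∈ U, u.1 = i ∧ 0 < u.2.count w
    · obtain ⟨u, huU, hui, hpos⟩ := hex
      subst hui
      rw [hval u huU, pvCnt_eq hnd huU]
    · push_neg at hex
      rw [PySem.Dict.getD_of_not_contains _ _ (pvNotMemKeys_contains inner i ?_)]
      · rw [pvCnt_eq_zero (fun u hu hc => by have := hex u hu hc.1; omega)]
      · rw [hiff]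
        rintro ⟨u, huU, hui, hpos⟩
        have := hex u huU hui
        omega

theorem pvScoreStep_mem_keys (U : List (Int × List String))
    (dw : PySem.Dict String (PySem.Dict Int Int)) (hdw : pvDWOK U dw)
    (s : PySem.Dict Int Int) (w : String) (i : Int) :
    i ∈ (searchScoreStep dw s w).keys ↔
      i ∈ s.keys ∨ ∃ u ∈ U, u.1 = i ∧ 0 < u.2.count w := by
  unfold searchScoreStep
  cases hget : dw.get? w with
  | none =>
    have hz := (hdw w).2 hget
    constructor
    · exact fun h => Or.inl h
    · rintro (h | ⟨u, huU, _, hpos⟩)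
      · exact h
      · rw [hz u huU] at hpos; cases hpos
  | some inner =>
    obtain ⟨hknd, hiff, hval⟩ := (hdw w).1 inner hget
    rw [PySem.Dict.keys_foldl_insert_key inner.items (fun p => p.1)
      (fun s p => s.getD p.1 0 + p.2) s]
    rw [PySem.Set.mem_update]
    have : (inner.items.map (fun p => p.1)) = inner.keys := rfl
    rw [this, hiff]

theorem pvScoreStep_nodup (dw : PySem.Dict String (PySem.Dict Int Int))
    (s : PySem.Dict Int Int) (w : String) (h : s.keys.Nodup) :
    (searchScoreStep dw s w).keys.Nodup := by
  unfold searchScoreStep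
  cases dw.get? w with
  | none => exact h
  | some inner =>
    exact PySem.Dict.nodup_keys_foldl_insert_key inner.items (fun p => p.1)
      (fun s p => s.getD p.1 0 + p.2) s h

theorem pvScoreFold_getD (U : List (Int × List String))
    (dw : PySem.Dict String (PySem.Dict Int Int))
    (hnd : (U.map Prod.fst).Nodup) (hdw : pvDWOK U dw) :
    ∀ (Wl : List String) (s : PySem.Dict Int Int) (i : Int),
    (Wl.foldl (searchScoreStep dw) s).getD i 0 =
      s.getD i 0 + (Wl.map (fun w => pvCnt U w i)).sum := by
  intro Wl
  induction Wl with
  | nil => intro s i; simp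
  | cons w Wl ih =>
    intro s i
    rw [List.foldl_cons, ih, pvScoreStep_getD U dw hnd hdw]
    simp only [List.map_cons, List.sum_cons]
    ring

theorem pvScoreFold_mem_keys (U : List (Int × List String))
    (dw : PySem.Dict String (PySem.Dict Int Int)) (hdw : pvDWOK U dw) :
    ∀ (Wl : List String) (s : PySem.Dict Int Int) (i : Int),
    (i ∈ (Wl.foldl (searchScoreStep dw) s).keys ↔
      i ∈ s.keys ∨ ∃ w ∈ Wl, ∃ u ∈ U, u.1 = i ∧ 0 < u.2.count w) := by
  intro Wl
  induction Wl with
  | nil => intro s i; simp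
  | cons w Wl ih =>
    intro s i
    rw [List.foldl_cons, ih, pvScoreStep_mem_keys U dw hdw]
    constructor
    · rintro ((h | ⟨u, hu, he, hp⟩) | ⟨w', hw', hu⟩)
      · exact Or.inl h
      · exact Or.inr ⟨w, by simp, u, hu, he, hp⟩
      · exact Or.inr ⟨w', by simp [hw'], hu⟩
    · rintro (h | ⟨w', hw', hu⟩)
      · exact Or.inl (Or.inl h)
      · rcases List.mem_cons.mp hw' with rfl | hw'
        · exact Or.inl (Or.inr hu)
        · exact Or.inr ⟨w', hw', hu⟩

theorem pvScoreFold_nodup (dw : PySem.Dict String (PySem.Dict Int Int)) :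
    ∀ (Wl : List String) (s : PySem.Dict Int Int), s.keys.Nodup →
    (Wl.foldl (searchScoreStep dw) s).keys.Nodup := by
  intro Wl
  induction Wl with
  | nil => exact fun s h => h
  | cons w Wl ih => exact fun s h => ih _ (pvScoreStep_nodup dw s w h)

theorem pvSum_pos {l : List Int} (h0 : ∀ x ∈ l, 0 ≤ x) (hx : ∃ x ∈ l, 0 < x) : 0 < l.sum := by
  induction l with
  | nil => rcases hx with ⟨x, hx, _⟩; cases hx
  | cons y t ih =>
    have hy := h0 y (by simp)
    have ht : 0 ≤ t.sum := List.sum_nonneg (fun x hx => h0 x (by simp [hx]))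
    rcases hx with ⟨x, hx, hxp⟩
    rcases List.mem_cons.mp hx with rfl | hx
    · simp only [List.sum_cons]; omega
    · have := ih (fun x hx => h0 x (by simp [hx])) ⟨x, hx, hxp⟩
      simp only [List.sum_cons]; omega

theorem pvSum_indicator (x : String) (Wl : List String) (hnd : Wl.Nodup) :
    (Wl.map (fun w => if x == w then (1 : Int) else 0)).sum =
      if Wl.contains x then 1 else 0 := by
  induction Wl with
  | nil => simp
  | cons w Wl ih =>
    simp only [List.nodup_cons] at hnd
    simp only [List.map_cons, List.sum_cons, List.contains_cons]
    by_cases h : x = w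
    · subst h
      rw [if_pos (by simp)]
      rw [show (Wl.map (fun w => if x == w then (1 : Int) else 0)) =
        Wl.map (fun _ => 0) from List.map_congr_left (fun w hw => by
          rw [if_neg (by simp; rintro rfl; exact hnd.1 hw)])]
      simp
    · rw [if_neg (by simpa using h), ih hnd.2]
      simp [show (x == w) = false by simpa using h]

theorem pvAltScore_eq (Wl : List String) (hnd : Wl.Nodup) (ws : List String) :
    searchAltScore Wl ws = (Wl.map (fun w => (ws.count w : Int))).sum := by
  induction ws with
  | nil => simp [searchAltScore]
  | cons x t ih =>
    have hstep : searchAltScore Wl (x :: t) =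
        (if Wl.contains x then 1 else 0) + searchAltScore Wl t := by
      simp only [searchAltScore, List.map_cons, List.sum_cons]
      rcases h : PySem.Set.contains Wl x with _ | _
      · simp [PySem.Set.contains] at h
        simp [h]
      · simp [PySem.Set.contains] at h
        simp [h]
    rw [hstep, ih]
    rw [show Wl.map (fun w => ((x :: t).count w : Int)) =
      Wl.map (fun w => (if x == w then (1 : Int) else 0) + (t.count w : Int)) from
      List.map_congr_left (fun w _ => by
        rw [List.count_cons]
        by_cases h : x = w
        · subst h
          rw [if_pos (by simp), if_pos (by simp)]
          push_cast
          omega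
        · rw [if_neg (by simpa using h), if_neg (by simpa using h)]
          push_cast
          omega)]
    rw [PySem.List.sum_map_add_int, pvSum_indicator x Wl hnd]

theorem pvGet?_char (d : PySem.Dict Int Int) (i c : Int) :
    d.get? i = some c ↔ (i ∈ d.keys ∧ d.getD i 0 = c) := by
  cases hg : d.get? i with
  | none =>
    constructor
    · intro h; cases h
    · rintro ⟨hk, -⟩
      rw [PySem.Dict.get?_eq_none_iff_not_mem_keys] at hg
      exact absurd hk hg
  | some v =>
    constructor
    · intro h
      injection h with h
      subst h
      refine ⟨?_, by simp [PySem.Dict.getD_eq_get?_getD, hg]⟩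
      exact PySem.Dict.mem_keys_of_mem_items _ (PySem.Dict.mem_items_of_get?_eq_some _ hg)
    · rintro ⟨-, hgd⟩
      rw [PySem.Dict.getD_eq_get?_getD, hg] at hgd
      simpa using hgd

theorem pvScoreItems_perm (U : List (Int × List String))
    (dw : PySem.Dict String (PySem.Dict Int Int))
    (hnd : (U.map Prod.fst).Nodup) (hdw : pvDWOK U dw) (r : String) :
    (searchScoreOf dw r).items.Perm (pvLfor U r) := by
  have hWnd : (PySem.Set.ofList (PySem.Str.split₀ r)).Nodup := PySem.Set.nodup_ofList _
  have hSA : searchScoreOf dw r =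
      (PySem.Set.ofList (PySem.Str.split₀ r)).foldl (searchScoreStep dw) PySem.Dict.empty := rfl
  have hknd : (searchScoreOf dw r).keys.Nodup := by
    rw [hSA]; exact pvScoreFold_nodup dw _ _ PySem.Dict.nodup_keys_empty
  have hitnd : (searchScoreOf dw r).items.Nodup := List.Nodup.of_map _ hknd
  have hLnd : (pvLfor U r).Nodup := by
    apply List.Nodup.filter
    have hmap : (U.map (fun u =>
        (u.1, searchAltScore (PySem.Set.ofList (PySem.Str.split₀ r)) u.2))).map Prod.fst =
        U.map Prod.fst := by
      simp [Function.comp]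
    exact List.Nodup.of_map Prod.fst (hmap ▸ hnd)
  refine (List.perm_ext_iff_of_nodup hitnd hLnd).mpr ?_
  rintro ⟨i, c⟩
  rw [← PySem.Dict.get?_eq_some_iff_mem_items _ _ _ hknd, pvGet?_char]
  constructor
  · rintro ⟨hk, hgd⟩
    rw [hSA, pvScoreFold_mem_keys U dw hdw] at hk
    rcases hk with h | ⟨w, hwW, u, huU, hui, hcnt⟩
    · simp [PySem.Dict.keys_empty] at h
    subst hui
    rw [hSA, pvScoreFold_getD U dw hnd hdw] at hgd
    rw [PySem.Dict.getD_empty] at hgd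
    have hsum : ((PySem.Set.ofList (PySem.Str.split₀ r)).map (fun w => pvCnt U w u.1)).sum =
        ((PySem.Set.ofList (PySem.Str.split₀ r)).map (fun w => (u.2.count w : Int))).sum :=
      congrArg List.sum (List.map_congr_left (fun w _ => pvCnt_eq hnd huU w))
    have hscore : searchAltScore (PySem.Set.ofList (PySem.Str.split₀ r)) u.2 = c := by
      rw [pvAltScore_eq _ hWnd, ← hsum]
      omega
    have hpos : 0 < c := by
      have := pvSum_pos (l := (PySem.Set.ofList (PySem.Str.split₀ r)).map (fun w => pvCnt U w u.1))
        (fun x hx => by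
          rcases List.mem_map.mp hx with ⟨w, _, rfl⟩
          exact pvCnt_nonneg U w u.1)
        ⟨pvCnt U w u.1, List.mem_map_of_mem hwW, by rw [pvCnt_eq hnd huU w]; exact_mod_cast hcnt⟩
      omega
    exact List.mem_filter.mpr ⟨List.mem_map.mpr ⟨u, huU, by rw [hscore]⟩, by simpa using hpos⟩
  · intro hm
    rcases List.mem_filter.mp hm with ⟨hmm, hposb⟩
    rcases List.mem_map.mp hmm with ⟨u, huU, hgu⟩
    have hui : u.1 = i := congrArg Prod.fst hgu
    have hsc : searchAltScore (PySem.Set.ofList (PySem.Str.split₀ r)) u.2 = c :=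
      congrArg Prod.snd hgu
    have hpos : 0 < c := by simpa using hposb
    have hex : ∃ w ∈ PySem.Set.ofList (PySem.Str.split₀ r), 0 < u.2.count w := by
      by_contra hno
      push_neg at hno
      have hz : ((PySem.Set.ofList (PySem.Str.split₀ r)).map (fun w => (u.2.count w : Int))).sum
          = 0 := List.sum_eq_zero (fun x hx => by
        rcases List.mem_map.mp hx with ⟨w, hw, rfl⟩
        have := hno w hw
        have : u.2.count w = 0 := by omega
        simp [this])
      rw [pvAltScore_eq _ hWnd, hz] at hsc
      omega
    constructor
    · rw [hSA, pvScoreFold_mem_keys U dw hdw]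
      rcases hex with ⟨w, hw, hcw⟩
      exact Or.inr ⟨w, hw, u, huU, hui, hcw⟩
    · rw [hSA, pvScoreFold_getD U dw hnd hdw, PySem.Dict.getD_empty, ← hui]
      have hsum : ((PySem.Set.ofList (PySem.Str.split₀ r)).map (fun w => pvCnt U w u.1)).sum =
          ((PySem.Set.ofList (PySem.Str.split₀ r)).map (fun w => (u.2.count w : Int))).sum :=
        congrArg List.sum (List.map_congr_left (fun w _ => pvCnt_eq hnd huU w))
      rw [hsum, ← pvAltScore_eq _ hWnd, hsc]
      omega

theorem pvScoreItems_pos (U : List (Int × List String))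
    (dw : PySem.Dict String (PySem.Dict Int Int))
    (hnd : (U.map Prod.fst).Nodup) (hdw : pvDWOK U dw) (r : String) :
    ∀ p ∈ (searchScoreOf dw r).items, 0 < p.2 := by
  intro p hp
  have := (pvScoreItems_perm U dw hnd hdw r).mem_iff.mp hp
  rcases List.mem_filter.mp this with ⟨-, hpos⟩
  simpa using hpos

theorem pvSortedScores_eq (U : List (Int × List String))
    (dw : PySem.Dict String (PySem.Dict Int Int))
    (hnd : (U.map Prod.fst).Nodup) (hdw : pvDWOK U dw) (r : String) :
    PySem.List.sorted2 (searchScoreOf dw r).items (fun it => -it.2) (fun it => it.1) =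
      PySem.List.sorted2 (pvLfor U r) (fun q => -q.2) (fun q => q.1) :=
  pvSorted2_congr _ _ (pvScoreItems_perm U dw hnd hdw r)

theorem pvAltLine_eq (rp : PySem.Dict Int (List Int)) (U : List (Int × List String)) (r : String) :
    searchAltLine rp U r =
      (PySem.List.sorted2 (pvLfor U r) (fun q => -q.2) (fun q => q.1)).flatMap (pvChunk rp) := by
  unfold searchAltLine
  rw [show (fun (out : List Int) (q : Int × Int) =>
      out ++ [q.1 + 1] ++ (rp.getD q.1 []).map (fun j => j + 1)) =
      (fun out q => out ++ pvChunk rp q) from funext (fun out => funext (fun q => by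
        rw [List.append_assoc]; rfl))]
  rw [PySem.List.foldl_append_eq_flatMap]
  rfl

-- ---- the dedup phases of A and B, related through the unique-document list ----

def pvUniq (docs : List String) (k : Nat) : List (Int × List String) :=
  (List.range k).filterMap (fun m =>
    if docs.getD m "" ∈ docs.take m then none
    else some ((m : Int), PySem.Str.split₀ (docs.getD m "")))

theorem pvUniq_succ (docs : List String) (k : Nat) :
    pvUniq docs (k + 1) = pvUniq docs k ++
      (if docs.getD k "" ∈ docs.take k then []
       else [((k : Int), PySem.Str.split₀ (docs.getD k ""))]) := by
  simp only [pvUniq, List.range_succ, List.filterMap_append, List.filterMap_cons,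
    List.filterMap_nil]
  by_cases h : docs.getD k "" ∈ docs.take k
  · rw [if_pos h, if_pos h]
  · rw [if_neg h, if_neg h]

theorem pvUniq_key_lt (docs : List String) (k : Nat) :
    ∀ u ∈ pvUniq docs k, u.1 < (k : Int) := by
  intro u hu
  rcases List.mem_filterMap.mp hu with ⟨m, hm, he⟩
  rw [List.mem_range] at hm
  by_cases h : docs.getD m "" ∈ docs.take m
  · rw [if_pos h] at he; cases he
  · rw [if_neg h] at he
    injection he with he
    rw [← he]
    show (m : Int) < (k : Int)
    exact_mod_cast hm

theorem pvUniq_fst_nodup (docs : List String) (k : Nat) :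
    ((pvUniq docs k).map Prod.fst).Nodup := by
  induction k with
  | zero => simp [pvUniq]
  | succ k ih =>
    rw [pvUniq_succ]
    by_cases h : docs.getD k "" ∈ docs.take k
    · rw [if_pos h, List.append_nil]
      exact ih
    · rw [if_neg h, List.map_append]
      refine List.Nodup.append ih (by simp) ?_
      intro a ha hb
      simp only [List.map_cons, List.map_nil, List.mem_singleton] at hb
      rcases List.mem_map.mp ha with ⟨u, hu, rfl⟩
      have := pvUniq_key_lt docs k u hu
      omega

theorem pvIndex?_append (l : List String) (x v : String) :
    PySem.List.index? (l ++ [x]) v =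
      if v ∈ l then PySem.List.index? l v
      else if v = x then some l.length else none := by
  by_cases hm : v ∈ l
  · rw [if_pos hm, PySem.List.index?_append_of_mem _ hm]
  · rw [if_neg hm]
    by_cases hv : v = x
    · subst hv
      rw [if_pos rfl]
      exact PySem.List.index?_append_singleton_self l v hm
    · rw [if_neg hv, PySem.List.index?_eq_none_iff]
      simp [hm, hv]

theorem pvWordStep_collapse (i : Int) (dw : PySem.Dict String (PySem.Dict Int Int)) (x : String) :
    searchWordStep i dw x =
      dw.insert x ((dw.getD x PySem.Dict.empty).insert i
        ((dw.getD x PySem.Dict.empty).getD i 0 + 1)) := by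
  unfold searchWordStep
  simp [PySem.Dict.getD_insert_self, PySem.Dict.insert_insert_self]

theorem pvWordFold_get? (i : Int) (ws : List String) :
    ∀ (dw : PySem.Dict String (PySem.Dict Int Int)) (w : String),
    (ws.foldl (searchWordStep i) dw).get? w =
      if ws.count w = 0 then dw.get? w
      else some ((dw.getD w PySem.Dict.empty).insert i
        ((dw.getD w PySem.Dict.empty).getD i 0 + (ws.count w : Int))) := by
  induction ws with
  | nil => intro dw w; simp
  | cons x t ih =>
    intro dw w
    rw [List.foldl_cons, pvWordStep_collapse, ih]
    by_cases hw : w = x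
    · subst hw
      have hcc : (if (w == w) = true then 1 else 0) = 1 := by simp
      rw [List.count_cons, hcc,
        if_neg (show ¬(List.count w t + 1 = 0) by omega)]
      by_cases h0 : t.count w = 0
      · rw [if_pos h0, PySem.Dict.get?_insert_self, h0]
        norm_num
      · rw [if_neg h0, PySem.Dict.getD_insert_self, PySem.Dict.getD_insert_self,
          PySem.Dict.insert_insert_self]
        have hv : ((dw.getD w PySem.Dict.empty).getD i 0 + 1) + (t.count w : Int) =
            (dw.getD w PySem.Dict.empty).getD i 0 + ((t.count w + 1 : Nat) : Int) := by
          push_cast; ring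
        rw [hv]
    · have hbe : (x == w) = false := by simpa using fun e => hw e.symm
      rw [List.count_cons, hbe]
      simp only [Bool.false_eq_true, if_false, Nat.add_zero]
      rw [PySem.Dict.get?_insert, if_neg hw, PySem.Dict.getD_insert, if_neg hw]

theorem pvDWOK_extend (U : List (Int × List String)) (i : Int) (ws : List String)
    (dw : PySem.Dict String (PySem.Dict Int Int)) (hdw : pvDWOK U dw)
    (hlt : ∀ u ∈ U, u.1 ≠ i) :
    pvDWOK (U ++ [(i, ws)]) (ws.foldl (searchWordStep i) dw) := by
  intro w
  rw [pvWordFold_get? i ws dw w]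
  by_cases hc : ws.count w = 0
  · rw [if_pos hc]
    refine ⟨?_, ?_⟩
    · intro inner hin
      obtain ⟨h1, h2, h3⟩ := (hdw w).1 inner hin
      refine ⟨h1, ?_, ?_⟩
      · intro j
        rw [h2]
        constructor
        · rintro ⟨u, hu, he, hp⟩
          exact ⟨u, List.mem_append_left _ hu, he, hp⟩
        · rintro ⟨u, hu, he, hp⟩
          rcases List.mem_append.mp hu with hu | hu
          · exact ⟨u, hu, he, hp⟩
          · rcases List.mem_singleton.mp hu with rfl
            rw [hc] at hp
            cases hp
      · intro u hu
        rcases List.mem_append.mp hu with hu | hu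
        · exact h3 u hu
        · rcases List.mem_singleton.mp hu with rfl
          have hni : (i : Int) ∉ inner.keys := by
            rw [h2]
            rintro ⟨u, hu, he, hp⟩
            exact (hlt u hu) he
          rw [PySem.Dict.getD_of_not_contains _ _ (pvNotMemKeys_contains inner i hni), hc]
          simp
    · intro hnone
      intro u hu
      rcases List.mem_append.mp hu with hu | hu
      · exact (hdw w).2 hnone u hu
      · rcases List.mem_singleton.mp hu with rfl
        exact hc
  · rw [if_neg hc]
    refine ⟨?_, fun hnone => by cases hnone⟩
    intro inner hin
    injection hin with hin
    subst hin
    cases hget : dw.get? w with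
    | none =>
      rw [PySem.Dict.getD_of_get?_eq_none _ _ hget]
      have hU0 : ∀ u ∈ U, u.2.count w = 0 := (hdw w).2 hget
      refine ⟨?_, ?_, ?_⟩
      · rw [PySem.Dict.keys_insert_of_not_contains _ _ (PySem.Dict.contains_empty i)]
        simp
      · intro j
        rw [PySem.Dict.keys_insert_of_not_contains _ _ (PySem.Dict.contains_empty i)]
        simp only [PySem.Dict.keys_empty, List.nil_append, List.mem_singleton]
        constructor
        · rintro rfl
          exact ⟨(j, ws), List.mem_append_right _ (by simp), rfl, Nat.pos_of_ne_zero hc⟩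
        · rintro ⟨u, hu, he, hp⟩
          rcases List.mem_append.mp hu with hu | hu
          · rw [hU0 u hu] at hp; cases hp
          · rcases List.mem_singleton.mp hu with rfl
            exact he.symm
      · intro u hu
        rcases List.mem_append.mp hu with hu | hu
        · rw [PySem.Dict.getD_insert_of_ne _ _ _ (hlt u hu), PySem.Dict.getD_empty, hU0 u hu]
          simp
        · rcases List.mem_singleton.mp hu with rfl
          rw [PySem.Dict.getD_insert_self, PySem.Dict.getD_empty]
          simp
    | some inner0 =>
      rw [PySem.Dict.getD_of_get?_eq_some _ _ hget]
      obtain ⟨h1, h2, h3⟩ := (hdw w).1 inner0 hget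
      have hni : i ∉ inner0.keys := by
        rw [h2]
        rintro ⟨u, hu, he, hp⟩
        exact (hlt u hu) he
      have hcontains : inner0.contains i = false := pvNotMemKeys_contains inner0 i hni
      refine ⟨?_, ?_, ?_⟩
      · rw [PySem.Dict.keys_insert_of_not_contains _ _ hcontains]
        exact List.Nodup.append h1 (by simp) (fun a ha hb => by
          rcases List.mem_singleton.mp hb with rfl
          exact hni ha)
      · intro j
        rw [PySem.Dict.keys_insert_of_not_contains _ _ hcontains, List.mem_append,
          List.mem_singleton, h2]
        constructor
        · rintro (⟨u, hu, he, hp⟩ | rfl)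
          · exact ⟨u, List.mem_append_left _ hu, he, hp⟩
          · exact ⟨(j, ws), List.mem_append_right _ (by simp), rfl, Nat.pos_of_ne_zero hc⟩
        · rintro ⟨u, hu, he, hp⟩
          rcases List.mem_append.mp hu with hu | hu
          · exact Or.inl ⟨u, hu, he, hp⟩
          · rcases List.mem_singleton.mp hu with rfl
            exact Or.inr he.symm
      · intro u hu
        rcases List.mem_append.mp hu with hu | hu
        · rw [PySem.Dict.getD_insert_of_ne _ _ _ (hlt u hu)]
          exact h3 u hu
        · rcases List.mem_singleton.mp hu with rfl
          rw [PySem.Dict.getD_insert_self,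
            PySem.Dict.getD_of_not_contains _ _ hcontains]
          simp

theorem pvDedup_inv (docs : List String) :
    ∀ k : Nat, k ≤ docs.length →
    ((PySem.List.pyRange 0 (k : Int) 1).foldl (searchIndexStep docs)
        (PySem.Dict.empty, PySem.Dict.empty)).2 =
      ((PySem.List.enumerate (docs.take k)).foldl searchDedupStep
        (PySem.Dict.empty, PySem.Dict.empty, [])).2.1 ∧
    ((PySem.List.enumerate (docs.take k)).foldl searchDedupStep
        (PySem.Dict.empty, PySem.Dict.empty, [])).2.2 = pvUniq docs k ∧
    (∀ d : String,
      ((PySem.List.enumerate (docs.take k)).foldl searchDedupStep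
        (PySem.Dict.empty, PySem.Dict.empty, [])).1.get? d =
      (PySem.List.index? (docs.take k) d).map (fun n => (n : Int))) ∧
    pvDWOK (pvUniq docs k)
      (((PySem.List.pyRange 0 (k : Int) 1).foldl (searchIndexStep docs)
        (PySem.Dict.empty, PySem.Dict.empty)).1) := by
  intro k
  induction k with
  | zero =>
    intro _
    have hA : PySem.List.pyRange 0 ((0 : Nat) : Int) 1 = [] :=
      PySem.List.pyRange_one_eq_nil (by simp)
    have hB : docs.take 0 = [] := rfl
    rw [hA, hB, PySem.List.enumerate_nil]
    refine ⟨rfl, by simp [pvUniq], ?_, ?_⟩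
    · intro d
      rw [List.foldl_nil, (PySem.List.index?_eq_none_iff _ _).mpr (by simp)]
      exact PySem.Dict.get?_empty d
    · intro w
      refine ⟨?_, ?_⟩
      · intro inner hin
        rw [List.foldl_nil, PySem.Dict.get?_empty] at hin
        cases hin
      · intro _ u hu
        simp [pvUniq] at hu
  | succ k ih =>
    intro hk1
    have hklt : k < docs.length := hk1
    obtain ⟨hrp, huq, hfi, hdw⟩ := ih (Nat.le_of_succ_le hk1)
    have hr : PySem.List.pyRange 0 ((k + 1 : Nat) : Int) 1 =
        PySem.List.pyRange 0 (k : Int) 1 ++ [(k : Int)] := by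
      push_cast
      exact PySem.List.pyRange_one_succ_right (by omega)
    have hd : docs[k]? = some (docs.getD k "") := by
      rw [List.getElem?_eq_getElem hklt]
      simp [List.getD, List.getElem?_eq_getElem hklt]
    have ht : docs.take (k + 1) = docs.take k ++ [docs.getD k ""] := by
      rw [List.take_succ, hd]
      rfl
    have hlen : (docs.take k).length = k := by
      rw [List.length_take]
      omega
    have he : PySem.List.enumerate (docs.take (k + 1)) =
        PySem.List.enumerate (docs.take k) ++ [((k : Int), docs.getD k "")] := by
      rw [ht, PySem.List.enumerate_append, PySem.List.enumerate_cons, PySem.List.enumerate_nil]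
      simp [hlen]
    rw [hr, he, List.foldl_append, List.foldl_append, List.foldl_cons, List.foldl_cons,
      List.foldl_nil, List.foldl_nil]
    by_cases hm : docs.getD k "" ∈ docs.take k
    · obtain ⟨n, hn⟩ := Option.isSome_iff_exists.mp
        ((PySem.List.index?_isSome_iff (docs.take k) (docs.getD k "")).mpr hm)
      have hstepA : ∀ st : PySem.Dict String (PySem.Dict Int Int) × PySem.Dict Int (List Int),
          searchIndexStep docs st (k : Int) =
            (st.1, st.2.insert (n : Int) (st.2.getD (n : Int) [] ++ [(k : Int)])) := by
        intro st
        unfold searchIndexStep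
        rw [PySem.List.pyGetD_natCast, PySem.List.slice_to_natCast, if_pos hm, hn]
        rfl
      have hstepB : ∀ st : PySem.Dict String Int × PySem.Dict Int (List Int) ×
            List (Int × List String), st.1.get? (docs.getD k "") = some ((n : Nat) : Int) →
          searchDedupStep st ((k : Int), docs.getD k "") =
            (st.1, st.2.1.insert (n : Int) (st.2.1.getD (n : Int) [] ++ [(k : Int)]), st.2.2) := by
        intro st hget
        unfold searchDedupStep
        rw [hget]
        rfl
      rw [hstepA, hstepB _ (by rw [hfi, hn]; rfl)]
      refine ⟨by rw [hrp], ?_, ?_, ?_⟩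
      · rw [huq, pvUniq_succ, if_pos hm, List.append_nil]
      · intro d'
        rw [hfi d', ht, pvIndex?_append]
        by_cases h1 : d' ∈ docs.take k
        · rw [if_pos h1]
        · rw [if_neg h1, if_neg (fun e : d' = docs.getD k "" => h1 (by rw [e]; exact hm)),
            (PySem.List.index?_eq_none_iff _ _).mpr h1]
      · rw [pvUniq_succ, if_pos hm, List.append_nil]
        exact hdw
    · have hidx : PySem.List.index? (docs.take k) (docs.getD k "") = none :=
        (PySem.List.index?_eq_none_iff _ _).mpr hm
      have hstepA : ∀ st : PySem.Dict String (PySem.Dict Int Int) × PySem.Dict Int (List Int),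
          searchIndexStep docs st (k : Int) =
            ((PySem.Str.split₀ (docs.getD k "")).foldl (searchWordStep (k : Int)) st.1, st.2) := by
        intro st
        unfold searchIndexStep
        rw [PySem.List.pyGetD_natCast, PySem.List.slice_to_natCast, if_neg hm]
      have hstepB : ∀ st : PySem.Dict String Int × PySem.Dict Int (List Int) ×
            List (Int × List String), st.1.get? (docs.getD k "") = none →
          searchDedupStep st ((k : Int), docs.getD k "") =
            (st.1.insert (docs.getD k "") (k : Int), st.2.1,
              st.2.2 ++ [((k : Int), PySem.Str.split₀ (docs.getD k ""))]) := by
        intro st hget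
        unfold searchDedupStep
        rw [hget]
      rw [hstepA, hstepB _ (by rw [hfi, hidx]; rfl)]
      refine ⟨by rw [hrp], ?_, ?_, ?_⟩
      · rw [huq, pvUniq_succ, if_neg hm]
      · intro d'
        rw [PySem.Dict.get?_insert, ht, pvIndex?_append]
        by_cases h1 : d' = docs.getD k ""
        · rw [if_pos h1, if_neg (h1 ▸ hm), if_pos h1,
            hlen]
          rfl
        · rw [if_neg h1, hfi d']
          by_cases h2 : d' ∈ docs.take k
          · rw [if_pos h2]
          · rw [if_neg h2, if_neg h1, (PySem.List.index?_eq_none_iff _ _).mpr h2]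
      · rw [pvUniq_succ, if_neg hm]
        refine pvDWOK_extend _ _ _ _ hdw ?_
        intro u hu
        have := pvUniq_key_lt docs k u hu
        omega

-- ---- final assembly ----

def pvLineOf (dw : PySem.Dict String (PySem.Dict Int Int)) (rp : PySem.Dict Int (List Int))
    (r : String) : List Int :=
  (PySem.List.sorted2 (searchScoreOf dw r).items (fun it => -it.2) (fun it => it.1)).flatMap
    (pvChunk rp)

def pvFmt (e : List Int) : String :=
  PySem.Str.join " " ((PySem.List.slice e none (some 5)).map PySem.Int.toStr)

theorem pvFlatMap_chunk_isEmpty (rp : PySem.Dict Int (List Int)) (lst : List (Int × Int)) :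
    (lst.flatMap (pvChunk rp)).isEmpty = lst.isEmpty := by
  cases lst with
  | nil => rfl
  | cons it lst => simp [pvChunk]

theorem pvResult_items (dw : PySem.Dict String (PySem.Dict Int Int))
    (rp : PySem.Dict Int (List Int)) (requests : List String)
    (hpos : ∀ r : String, ∀ p ∈ (searchScoreOf dw r).items, 0 < p.2) :
    ∀ k : Nat, k ≤ requests.length →
    ((PySem.List.pyRange 0 (k : Int) 1).foldl
      (fun res i =>
        (PySem.List.sorted2 (PySem.List.pyGetD (requests.map (searchScoreOf dw)) i
            PySem.Dict.empty).items (fun it => -it.2) (fun it => it.1)).foldl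
          (searchEmitStep rp i) res)
      PySem.Dict.empty).items =
    (List.range k).filterMap (fun j =>
      if (pvLineOf dw rp (requests.getD j "")).isEmpty then none
      else some ((j : Int), pvLineOf dw rp (requests.getD j ""))) := by
  intro k
  induction k with
  | zero =>
    intro _
    rw [PySem.List.pyRange_one_eq_nil (by simp)]
    rfl
  | succ k ih =>
    intro hk1
    have hklt : k < requests.length := hk1
    have hitems := ih (Nat.le_of_succ_le hk1)
    have hr : PySem.List.pyRange 0 ((k + 1 : Nat) : Int) 1 =
        PySem.List.pyRange 0 (k : Int) 1 ++ [(k : Int)] := by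
      push_cast
      exact PySem.List.pyRange_one_succ_right (by omega)
    rw [hr, List.foldl_append, List.foldl_cons, List.foldl_nil]
    have hsc : PySem.List.pyGetD (requests.map (searchScoreOf dw)) ((k : Nat) : Int)
        PySem.Dict.empty = searchScoreOf dw (requests.getD k "") := by
      rw [PySem.List.pyGetD_natCast]
      simp [List.getD, hklt]
    rw [hsc]
    have hfresh : (((PySem.List.pyRange 0 (k : Int) 1).foldl
        (fun res i =>
          (PySem.List.sorted2 (PySem.List.pyGetD (requests.map (searchScoreOf dw)) i
              PySem.Dict.empty).items (fun it => -it.2) (fun it => it.1)).foldl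
            (searchEmitStep rp i) res)
        PySem.Dict.empty)).contains ((k : Nat) : Int) = false := by
      simp only [PySem.Dict.contains, hitems]
      rw [List.any_eq_false]
      intro p hp
      rcases List.mem_filterMap.mp hp with ⟨j, hj, he⟩
      rw [List.mem_range] at hj
      by_cases hc : (pvLineOf dw rp (requests.getD j "")).isEmpty
      · rw [if_pos hc] at he; cases he
      · rw [if_neg hc] at he
        injection he with he
        rw [← he]
        intro hje
        have hje' : (j : Int) = (k : Int) := by simpa using hje
        have : j = k := by exact_mod_cast hje'
        omega
    have hmempos : ∀ it ∈ PySem.List.sorted2 (searchScoreOf dw (requests.getD k "")).items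
        (fun it => -it.2) (fun it => it.1), 0 < it.2 := by
      intro it hit
      exact hpos _ it ((PySem.List.sorted2_perm _ _ _ _).mem_iff.mp hit)
    rw [pvEmit_fold_items rp ((k : Nat) : Int) _ hmempos _ hfresh, hitems]
    rw [List.range_succ, List.filterMap_append]
    congr 1
    simp only [List.filterMap_cons, List.filterMap_nil]
    rw [show (PySem.List.sorted2 (searchScoreOf dw (requests.getD k "")).items
        (fun it => -it.2) (fun it => it.1)).isEmpty =
        (pvLineOf dw rp (requests.getD k "")).isEmpty from
      (pvFlatMap_chunk_isEmpty rp _).symm]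
    by_cases hc : (pvLineOf dw rp (requests.getD k "")).isEmpty
    · rw [if_pos hc, if_pos hc]
    · rw [if_neg hc, if_neg hc]
      rfl

theorem pvFoldl_skip_append {α β : Type} (p : α → Bool) (f : α → β) (l : List α) :
    ∀ acc : List β, l.foldl (fun acc x => if p x then acc else acc ++ [f x]) acc =
      acc ++ l.filterMap (fun x => if p x then none else some (f x)) := by
  induction l with
  | nil => intro acc; simp
  | cons x t ih =>
    intro acc
    rw [List.foldl_cons]
    by_cases h : p x
    · rw [if_pos h, ih]
      simp [h]
    · rw [if_neg h, ih]
      simp [h]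

theorem pvRange_filterMap {β : Type} (F : String → Option β) :
    ∀ l : List String,
    (List.range l.length).filterMap (fun j => F (l.getD j "")) = l.filterMap F := by
  intro l
  induction l with
  | nil => simp
  | cons x t ih =>
    rw [List.length_cons, List.range_succ_eq_map, List.filterMap_cons, List.filterMap_map]
    rw [List.getD_cons_zero, List.filterMap_cons]
    have : ((fun j => F ((x :: t).getD j "")) ∘ Nat.succ) = (fun j => F (t.getD j "")) := by
      funext j
      simp
    rw [this, ih]

theorem pvPost (lineF : Nat → List Int) (n : Nat) :
    ((((List.range n).filterMap (fun j =>
        if (lineF j).isEmpty then none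
        else some ((j : Int), lineF j))).map (fun x => x.2)).filter
      (fun e => decide (0 < e.length))).map
      (fun e => PySem.Str.join " " ((PySem.List.slice e none (some 5)).map PySem.Int.toStr)) =
    (List.range n).filterMap (fun j =>
      if (lineF j).isEmpty then none
      else some (PySem.Str.join " "
        ((PySem.List.slice (lineF j) none (some 5)).map PySem.Int.toStr))) := by
  rw [List.map_filterMap]
  have h1 : ∀ j, Option.map (fun (x : Int × List Int) => x.2)
      (if (lineF j).isEmpty then none else some ((j : Int), lineF j)) =
      if (lineF j).isEmpty then none else some (lineF j) := by
    intro j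
    by_cases h : (lineF j).isEmpty <;> simp [h]
  simp only [h1]
  rw [List.filter_eq_self.mpr ?_]
  · rw [List.map_filterMap]
    have h2 : ∀ j, Option.map
        (fun e => PySem.Str.join " " ((PySem.List.slice e none (some 5)).map PySem.Int.toStr))
        (if (lineF j).isEmpty then none else some (lineF j)) =
        if (lineF j).isEmpty then none
        else some (PySem.Str.join " "
          ((PySem.List.slice (lineF j) none (some 5)).map PySem.Int.toStr)) := by
      intro j
      by_cases h : (lineF j).isEmpty <;> simp [h]
    simp only [h2]
  · intro e he
    rcases List.mem_filterMap.mp he with ⟨j, hj, hej⟩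
    by_cases h : (lineF j).isEmpty
    · rw [if_pos h] at hej; cases hej
    · rw [if_neg h] at hej
      injection hej with hej
      subst hej
      simp only [decide_eq_true_eq]
      rw [List.isEmpty_iff] at h
      exact List.length_pos_iff.mpr h

theorem pvMain (docs requests : List String) : search docs requests = search_alt docs requests := by
  have hinv := pvDedup_inv docs docs.length (le_refl _)
  rw [List.take_length] at hinv
  obtain ⟨hrp, huq, hfi, hdw⟩ := hinv
  have hnd := pvUniq_fst_nodup docs docs.length
  unfold search search_alt
  simp only [PySem.List.len]
  set stA := (PySem.List.pyRange 0 ((docs.length : Int)) 1).foldl (searchIndexStep docs)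
    (PySem.Dict.empty, PySem.Dict.empty) with hstA
  set stB := (PySem.List.enumerate docs).foldl searchDedupStep
    (PySem.Dict.empty, PySem.Dict.empty, []) with hstB
  rw [← hrp, huq]
  rw [PySem.List.foldl_pyRange_zero_pyGetD' requests ""
    (fun acc r => acc ++ [searchScoreOf stA.1 r]) []]
  rw [PySem.List.foldl_append_singleton_eq_map (searchScoreOf stA.1) requests []]
  rw [List.nil_append, List.length_map]
  simp only [PySem.Dict.values]
  rw [pvResult_items stA.1 stA.2 requests
    (fun r => pvScoreItems_pos (pvUniq docs docs.length) stA.1 hnd hdw r)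
    requests.length (le_refl _)]
  rw [pvPost (fun j => pvLineOf stA.1 stA.2 (requests.getD j "")) requests.length]
  rw [pvRange_filterMap (fun r =>
    if (pvLineOf stA.1 stA.2 r).isEmpty then none
    else some (PySem.Str.join " "
      ((PySem.List.slice (pvLineOf stA.1 stA.2 r) none (some 5)).map PySem.Int.toStr))) requests]
  rw [pvFoldl_skip_append (fun r => (searchAltLine stA.2 (pvUniq docs docs.length) r).isEmpty)
    (fun r => PySem.Str.join " "
      ((PySem.List.slice (searchAltLine stA.2 (pvUniq docs docs.length) r) none
        (some 5)).map PySem.Int.toStr)) requests []]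
  rw [List.nil_append]
  have hline : ∀ r : String,
      pvLineOf stA.1 stA.2 r = searchAltLine stA.2 (pvUniq docs docs.length) r := by
    intro r
    rw [pvAltLine_eq]
    unfold pvLineOf
    rw [pvSortedScores_eq (pvUniq docs docs.length) stA.1 hnd hdw r]
  simp only [hline]

-- ===== VERDICT (by name: the statement is the Claim_ definition above) =====
theorem search_spec : Claim_equal_search := by
  intro docs requests _
  show search docs requests = search_alt docs requests
  exact pvMain docs requests
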